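-- pv_equiv track=rewrite | github.com/MatteoSchiavi/LLM_Wiki | search.py | _generate_snippet
-- ===== SOURCE A (Python) =====
-- def _generate_snippet(text: str, query_terms: list[str], max_len: int = 200) -> str:
--     """Generate a snippet with context around the best cluster of matching terms."""
--     if not text:
--         return ""
--
--     text_lower = text.lower()
--
--     # Find positions of all query terms in the text
--     match_positions = []
--     for term in query_terms:
--         start = 0
--         while True:
--             pos = text_lower.find(term, start)
--             if pos < 0:
--                 break
--             match_positions.append((pos, pos + len(term)))
--             start = pos + 1
--
--     if not match_positions:
--         # No matches: return the beginning of the text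
--         snippet = text[:max_len]
--         return snippet + ("\u2026" if len(text) > max_len else "")
--
--     # Find the best window — the region with the densest cluster of matches
--     # Score each possible window start by counting matches that fall within it
--     best_start = 0
--     best_count = 0
--     window_size = max_len
--
--     # Sort match positions
--     match_positions.sort()
--
--     # Sliding window: for each match as potential window anchor, count matches
--     for i, (m_start, _) in enumerate(match_positions):
--         count = 0
--         for j in range(i, len(match_positions)):
--             if match_positions[j][0] - m_start < window_size:
--                 count += 1
--             else:
--                 break
--         if count > best_count:
--             best_count = count
--             best_start = max(0, m_start - 40)  # slight left padding
--
--     snippet = text[best_start:best_start + window_size]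
--
--     # Clean cut at word boundaries
--     if best_start > 0:
--         # Don't cut mid-word at the start
--         space_pos = snippet.find(" ")
--         if space_pos > 0 and space_pos < 30:
--             snippet = snippet[space_pos + 1:]
--         snippet = "\u2026" + snippet
--
--     if best_start + window_size < len(text):
--         # Don't cut mid-word at the end
--         last_space = snippet.rfind(" ")
--         if last_space > window_size // 2:
--             snippet = snippet[:last_space]
--         snippet = snippet + "\u2026"
--
--     return snippet
-- ===== SOURCE B (Python) =====
-- def _generate_snippet(text: str, query_terms: list[str], max_len: int = 200) -> str:
--     """Snippet around the densest cluster of matches; O(m) two-pointer sweep."""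
--     if not text:
--         return ""
--
--     positions = sorted(_match_starts(text.lower(), query_terms))
--
--     if not positions:
--         snippet = text[:max_len]
--         return snippet + ("\u2026" if len(text) > max_len else "")
--
--     best_start, _ = _best_window(positions, max_len)
--     return _trim(text, best_start, max_len)
--
--
-- def _match_starts(text_lower, query_terms):
--     out = []
--     for term in query_terms:
--         start = 0
--         while True:
--             pos = text_lower.find(term, start)
--             if pos < 0:
--                 break
--             out.append(pos)
--             start = pos + 1
--     return out
--
--
-- def _best_window(positions, window):
--     best_start, best_count, j = 0, 0, 0
--     n = len(positions)
--     for i, p in enumerate(positions):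
--         if j < i:
--             j = i
--         while j < n and positions[j] - p < window:
--             j += 1
--         if j - i > best_count:
--             best_count = j - i
--             best_start = max(0, p - 40)
--     return best_start, best_count
--
--
-- def _trim(text, best_start, window):
--     snippet = text[best_start:best_start + window]
--     if best_start > 0:
--         space_pos = snippet.find(" ")
--         if 0 < space_pos < 30:
--             snippet = snippet[space_pos + 1:]
--         snippet = "\u2026" + snippet
--     if best_start + window < len(text):
--         last_space = snippet.rfind(" ")
--         if last_space > window // 2:
--             snippet = snippet[:last_space]
--         snippet = snippet + "\u2026"
--     return snippet
-- ===== Notes on version B (the rewrite author's own statement) =====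
-- stated objective: faster
-- what changed: Replaces the quadratic per-anchor rescan of sorted match positions with a single monotone two-pointer sweep (working on bare start positions instead of (start,end) pairs), decomposed into helpers.
import Mathlib
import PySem

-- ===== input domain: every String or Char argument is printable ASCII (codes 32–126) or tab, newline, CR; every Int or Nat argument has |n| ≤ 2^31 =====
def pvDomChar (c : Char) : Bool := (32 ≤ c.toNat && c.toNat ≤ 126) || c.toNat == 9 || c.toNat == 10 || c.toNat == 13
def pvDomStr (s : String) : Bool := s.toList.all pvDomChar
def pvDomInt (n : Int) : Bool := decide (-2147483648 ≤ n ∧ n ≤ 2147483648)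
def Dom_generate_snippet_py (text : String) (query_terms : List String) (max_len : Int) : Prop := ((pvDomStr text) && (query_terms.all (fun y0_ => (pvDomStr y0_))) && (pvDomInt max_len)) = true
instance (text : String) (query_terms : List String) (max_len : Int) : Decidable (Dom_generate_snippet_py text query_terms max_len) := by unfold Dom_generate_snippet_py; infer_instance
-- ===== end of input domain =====

-- B replaces A's quadratic per-anchor rescan of the sorted match positions by a single
-- monotone two-pointer sweep over bare start positions (objective: faster, asymptotic).


-- ===== PORT A =====
-- the 'while True: pos = text_lower.find(term, start) …' loop; fuel = len(text)+2 suffices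
-- because start strictly increases each pass and find returns -1 once start > len(text)
def pvFindAllA (tl term : String) (fuel : Nat) (start : Int) (acc : List (Int × Int)) : List (Int × Int) :=
  match fuel with
  | 0 => acc
  | fuel + 1 =>
    let pos := PySem.Str.findFrom tl term start
    if pos < 0 then acc
    else pvFindAllA tl term fuel (pos + 1) (acc ++ [(pos, pos + PySem.Str.len term)])

-- A's inner 'for j in range(i, len): … else: break' counting loop
def pvCountA (ps : List (Int × Int)) (w p : Int) (j : Nat) : Nat :=
  if h : j < ps.length then
    if (ps[j]).1 - p < w then pvCountA ps w p (j + 1) + 1 else 0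
  else 0
termination_by ps.length - j

-- A's outer 'for i, (m_start, _) in enumerate(match_positions)' loop
def pvBestA (ps : List (Int × Int)) (w : Int) (i : Nat) (bs : Int) (bc : Nat) : Int × Nat :=
  if h : i < ps.length then
    let p := (ps[i]).1
    let c := pvCountA ps w p i
    if c > bc then pvBestA ps w (i + 1) (max 0 (p - 40)) c
    else pvBestA ps w (i + 1) bs bc
  else (bs, bc)
termination_by ps.length - i

def generate_snippet_py (text : String) (query_terms : List String) (max_len : Int) : String :=
  if text = "" then "" else
  let tl := PySem.Str.lower text
  let mp := query_terms.foldl (fun acc term => pvFindAllA tl term (text.toList.length + 2) 0 acc) []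
  if mp = [] then
    let snippet := PySem.Str.slice text none (some max_len)
    snippet ++ (if PySem.Str.len text > max_len then "…" else "")
  else
    let sps := PySem.List.sorted2 mp Prod.fst Prod.snd
    let best_start := (pvBestA sps max_len 0 0 0).1
    let snippet := PySem.Str.slice text (some best_start) (some (best_start + max_len))
    let snippet :=
      if best_start > 0 then
        let space_pos := PySem.Str.find snippet " "
        let snippet := if space_pos > 0 ∧ space_pos < 30 then PySem.Str.slice snippet (some (space_pos + 1)) none else snippet
        "…" ++ snippet
      else snippet
    if best_start + max_len < PySem.Str.len text then
      let last_space := PySem.Str.rfind snippet " "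
      let snippet := if last_space > PySem.Int.floordiv max_len 2 then PySem.Str.slice snippet none (some last_space) else snippet
      snippet ++ "…"
    else snippet

-- ===== PORT B =====
-- Source B _match_starts inner while loop (same fuel argument as for A's loop)
def pvFindAllB (tl term : String) (fuel : Nat) (start : Int) (acc : List Int) : List Int :=
  match fuel with
  | 0 => acc
  | fuel + 1 =>
    let pos := PySem.Str.findFrom tl term start
    if pos < 0 then acc
    else pvFindAllB tl term fuel (pos + 1) (acc ++ [pos])

-- Source B: the 'while j < n and positions[j] - p < window: j += 1' advance
def pvAdvance (ps : List Int) (w p : Int) (j : Nat) : Nat :=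
  if h : j < ps.length then
    if ps[j] - p < w then pvAdvance ps w p (j + 1) else j
  else j
termination_by ps.length - j

-- Source B _best_window: two-pointer sweep
def pvBestB (ps : List Int) (w : Int) (i j : Nat) (bs : Int) (bc : Nat) : Int × Nat :=
  if h : i < ps.length then
    let p := ps[i]
    let j1 := if j < i then i else j
    let j2 := pvAdvance ps w p j1
    if j2 - i > bc then pvBestB ps w (i + 1) j2 (max 0 (p - 40)) (j2 - i)
    else pvBestB ps w (i + 1) j2 bs bc
  else (bs, bc)
termination_by ps.length - i

-- Source B _trim
def pvTrim (text : String) (best_start window : Int) : String :=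
  let snippet := PySem.Str.slice text (some best_start) (some (best_start + window))
  let snippet :=
    if best_start > 0 then
      let space_pos := PySem.Str.find snippet " "
      let snippet := if space_pos > 0 ∧ space_pos < 30 then PySem.Str.slice snippet (some (space_pos + 1)) none else snippet
      "…" ++ snippet
    else snippet
  if best_start + window < PySem.Str.len text then
    let last_space := PySem.Str.rfind snippet " "
    let snippet := if last_space > PySem.Int.floordiv window 2 then PySem.Str.slice snippet none (some last_space) else snippet
    snippet ++ "…"
  else snippet

def generate_snippet_py_alt (text : String) (query_terms : List String) (max_len : Int) : String :=
  if text = "" then "" else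
  let tl := PySem.Str.lower text
  let starts := query_terms.foldl (fun acc term => pvFindAllB tl term (text.toList.length + 2) 0 acc) []
  let positions := PySem.List.sorted starts (fun x => x)
  if positions = [] then
    let snippet := PySem.Str.slice text none (some max_len)
    snippet ++ (if PySem.Str.len text > max_len then "…" else "")
  else
    pvTrim text (pvBestB positions max_len 0 0 0 0).1 max_len

-- ===== PRECONDITION & SPEC =====
def Spec_generate_snippet_py (text : String) (query_terms : List String) (max_len : Int) (out : String) : Prop := out = generate_snippet_py_alt text query_terms max_len
instance (text : String) (query_terms : List String) (max_len : Int) (out : String) : Decidable (Spec_generate_snippet_py text query_terms max_len out) := by unfold Spec_generate_snippet_py; infer_instance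

-- ===== CLAIM (what is proved, stated in full; the proofs are below) =====
def Claim_equal_generate_snippet_py : Prop := ∀ (text : String) (query_terms : List String) (max_len : Int), Dom_generate_snippet_py text query_terms max_len → Spec_generate_snippet_py text query_terms max_len (generate_snippet_py text query_terms max_len)

-- ===== LEMMAS AND PROOFS =====

-- the find-all loops collect the same positions (B keeps only the starts)
theorem pvFindAll_map (tl term : String) (fuel : Nat) :
    ∀ (start : Int) (acc : List (Int × Int)),
      pvFindAllB tl term fuel start (acc.map Prod.fst) = (pvFindAllA tl term fuel start acc).map Prod.fst := by
  induction fuel with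
  | zero => intro start acc; rfl
  | succ fuel ih =>
    intro start acc
    simp only [pvFindAllA, pvFindAllB]
    by_cases h : PySem.Str.findFrom tl term start < 0
    · rw [if_pos h, if_pos h]
    · rw [if_neg h, if_neg h]
      have := ih (PySem.Str.findFrom tl term start + 1)
        (acc ++ [(PySem.Str.findFrom tl term start,
                  PySem.Str.findFrom tl term start + PySem.Str.len term)])
      simpa using this

theorem pvCollect_map (tl : String) (f : Nat) (qts : List String) :
    ∀ (acc : List (Int × Int)),
      qts.foldl (fun acc term => pvFindAllB tl term f 0 acc) (acc.map Prod.fst)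
        = (qts.foldl (fun acc term => pvFindAllA tl term f 0 acc) acc).map Prod.fst := by
  induction qts with
  | nil => intro acc; rfl
  | cons t ts ih =>
    intro acc
    simp only [List.foldl_cons]
    rw [pvFindAll_map, ih]

-- sorted2's comparator
def pvBefore2 (a b : Int × Int) : Bool :=
  decide (a.1 < b.1) || (!decide (b.1 < a.1) && decide (a.2 < b.2))

theorem sorted2_eq_foldl (mp : List (Int × Int)) :
    PySem.List.sorted2 mp Prod.fst Prod.snd
      = mp.foldl (fun acc x => PySem.List.insertBy pvBefore2 x acc) [] := rfl

def pvR (a b : Int × Int) : Prop := a.1 ≤ b.1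

theorem insertBy_pairwise (x : Int × Int) :
    ∀ (l : List (Int × Int)), l.Pairwise pvR → (PySem.List.insertBy pvBefore2 x l).Pairwise pvR := by
  intro l
  induction l with
  | nil => intro _; simp [PySem.List.insertBy, pvR]
  | cons y ys ih =>
    intro hp
    rw [List.pairwise_cons] at hp
    show (if pvBefore2 x y = true then x :: y :: ys else y :: PySem.List.insertBy pvBefore2 x ys).Pairwise pvR
    by_cases hb : pvBefore2 x y = true
    · have hxy : x.1 ≤ y.1 := by
        simp only [pvBefore2, Bool.or_eq_true, decide_eq_true_eq, Bool.and_eq_true,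
          Bool.not_eq_true', decide_eq_false_iff_not] at hb
        rcases hb with h | ⟨h, _⟩ <;> omega
      simp only [hb, if_true]
      refine List.pairwise_cons.mpr ⟨?_, List.pairwise_cons.mpr hp⟩
      intro z hz
      rcases List.mem_cons.mp hz with rfl | hz
      · exact hxy
      · exact le_trans hxy (hp.1 z hz)
    · have hyx : y.1 ≤ x.1 := by
        simp only [pvBefore2, Bool.or_eq_true, decide_eq_true_eq, Bool.and_eq_true,
          Bool.not_eq_true', decide_eq_false_iff_not] at hb
        omega
      simp only [hb]
      refine List.pairwise_cons.mpr ⟨?_, ih hp.2⟩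
      intro z hz
      rcases (PySem.List.mem_insertBy pvBefore2 x z ys).mp hz with rfl | hz
      · exact hyx
      · exact hp.1 z hz

theorem sorted2_pairwise_fst (mp : List (Int × Int)) :
    (PySem.List.sorted2 mp Prod.fst Prod.snd).Pairwise pvR := by
  rw [sorted2_eq_foldl]
  have : ∀ (l : List (Int × Int)) (acc : List (Int × Int)), acc.Pairwise pvR →
      (l.foldl (fun acc x => PySem.List.insertBy pvBefore2 x acc) acc).Pairwise pvR := by
    intro l
    induction l with
    | nil => intro acc h; exact h
    | cons x xs ih => intro acc h; exact ih _ (insertBy_pairwise x acc h)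
  exact this mp [] (by simp)

-- B's sorted start list IS the fst-projection of A's sorted pair list
theorem sorted_map_fst (mp : List (Int × Int)) :
    PySem.List.sorted (mp.map Prod.fst) (fun x => x)
      = (PySem.List.sorted2 mp Prod.fst Prod.snd).map Prod.fst := by
  have hperm : (PySem.List.sorted (mp.map Prod.fst) (fun x => x)).Perm
      ((PySem.List.sorted2 mp Prod.fst Prod.snd).map Prod.fst) :=
    (PySem.List.sorted_perm _ _ _).trans ((PySem.List.sorted2_perm mp Prod.fst Prod.snd false).map Prod.fst).symm
  have h1 : (PySem.List.sorted (mp.map Prod.fst) (fun x => x)).Pairwise (· ≤ ·) := by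
    have := PySem.List.sorted_pairwise (mp.map Prod.fst) (fun x => x)
    simpa using this
  have h2 : ((PySem.List.sorted2 mp Prod.fst Prod.snd).map Prod.fst).Pairwise (· ≤ ·) :=
    List.pairwise_map.mpr (sorted2_pairwise_fst mp)
  exact List.eq_of_perm_of_sorted (fun a b _ _ h h' => le_antisymm h h') h1 h2 hperm

-- count on the bare start list, mirroring pvCountA
def pvCntF (L : List Int) (w p : Int) (j : Nat) : Nat :=
  if h : j < L.length then
    if L[j] - p < w then pvCntF L w p (j + 1) + 1 else 0
  else 0
termination_by L.length - j

theorem pvCountA_eq_cntF (ps : List (Int × Int)) (w p : Int) :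
    ∀ j, pvCountA ps w p j = pvCntF (ps.map Prod.fst) w p j := by
  intro j
  induction hj : ps.length - j generalizing j with
  | zero =>
    rw [pvCountA, pvCntF]
    have : ¬ j < ps.length := by omega
    simp [this]
  | succ n ih =>
    rw [pvCountA, pvCntF]
    by_cases h : j < ps.length
    · simp only [h, dif_pos, List.length_map, List.getElem_map]
      rw [ih (j+1) (by omega)]
    · simp [h]

theorem pvAdvance_eq (L : List Int) (w p : Int) :
    ∀ j, pvAdvance L w p j = j + pvCntF L w p j := by
  intro j
  induction hj : L.length - j generalizing j with
  | zero =>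
    rw [pvAdvance, pvCntF]
    have : ¬ j < L.length := by omega
    simp [this]
  | succ n ih =>
    rw [pvAdvance, pvCntF]
    by_cases h : j < L.length
    · by_cases hp : L[j] - p < w
      · simp only [h, dif_pos, hp, if_pos]
        rw [ih (j+1) (by omega)]; omega
      · simp [h, hp]
    · simp [h]

theorem pvCntF_split (L : List Int) (w p : Int) :
    ∀ (d i : Nat), d ≤ pvCntF L w p i →
      i + pvCntF L w p i = (i + d) + pvCntF L w p (i + d) := by
  intro d
  induction d with
  | zero => intro i _; simp
  | succ n ih =>
    intro i hle
    have h1 : 1 ≤ pvCntF L w p i := by omega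
    have hlen : i < L.length := by
      by_contra h
      rw [pvCntF] at h1
      simp [h] at h1
    have hp : L[i] - p < w := by
      by_contra h
      rw [pvCntF] at h1
      simp [hlen, h] at h1
    have he : pvCntF L w p i = pvCntF L w p (i + 1) + 1 := by
      rw [pvCntF]; simp [hlen, hp]
    have hrec := ih (i + 1) (by omega)
    have hx : i + (n + 1) = (i + 1) + n := by omega
    rw [hx]
    omega

theorem pvCntF_mono (L : List Int) (w p p' : Int) (hpp : p ≤ p') :
    ∀ j, pvCntF L w p j ≤ pvCntF L w p' j := by
  intro j
  induction hj : L.length - j generalizing j with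
  | zero =>
    have h : ¬ j < L.length := by omega
    have e1 : pvCntF L w p j = 0 := by rw [pvCntF]; simp [h]
    omega
  | succ n ih =>
    by_cases h : j < L.length
    · by_cases hp : L[j] - p < w
      · have hp' : L[j] - p' < w := by omega
        have e1 : pvCntF L w p j = pvCntF L w p (j + 1) + 1 := by rw [pvCntF]; simp [h, hp]
        have e2 : pvCntF L w p' j = pvCntF L w p' (j + 1) + 1 := by rw [pvCntF]; simp [h, hp']
        have := ih (j + 1) (by omega)
        omega
      · have e1 : pvCntF L w p j = 0 := by rw [pvCntF]; simp [h, hp]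
        omega
    · have e1 : pvCntF L w p j = 0 := by rw [pvCntF]; simp [h]
      omega

theorem pvCntF_step (L : List Int) (w p : Int) (i : Nat) :
    pvCntF L w p i ≤ pvCntF L w p (i + 1) + 1 := by
  rw [pvCntF]
  by_cases h : i < L.length
  · by_cases hp : L[i] - p < w
    · simp [h, hp]
    · simp [h, hp]
  · simp [h]

-- getElem monotonicity from Pairwise (· ≤ ·)
theorem pairwise_getElem_le (L : List Int) (hL : L.Pairwise (· ≤ ·))
    {i k : Nat} (hik : i ≤ k) (hk : k < L.length) : L[i]'(by omega) ≤ L[k] := by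
  rcases Nat.eq_or_lt_of_le hik with rfl | hlt
  · rfl
  · exact List.pairwise_iff_getElem.mp hL i k (by omega) hk hlt

-- main loop equivalence: A's rescans and B's two-pointer sweep agree
theorem pvBest_eq (ps : List (Int × Int)) (w : Int)
    (hL : (ps.map Prod.fst).Pairwise (· ≤ ·)) :
    ∀ (i j : Nat) (bs : Int) (bc : Nat),
      (∀ h : i < ps.length, j ≤ i + pvCntF (ps.map Prod.fst) w ((ps.map Prod.fst)[i]'(by simpa using h)) i) →
      pvBestB (ps.map Prod.fst) w i j bs bc = pvBestA ps w i bs bc := by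
  intro i
  induction hn : ps.length - i generalizing i with
  | zero =>
    intro j bs bc _
    have h : ¬ i < ps.length := by omega
    rw [pvBestB, pvBestA]
    simp [h]
  | succ n ih =>
    intro j bs bc hinv
    by_cases h : i < ps.length
    · have hL' : i < (ps.map Prod.fst).length := by simpa using h
      have hgi : (ps.map Prod.fst)[i]'hL' = (ps[i]).1 := by simp
      have hinv' : j ≤ i + pvCntF (ps.map Prod.fst) w ((ps.map Prod.fst)[i]'hL') i := hinv h
      rw [pvBestB, pvBestA]
      simp only [hL', h, dif_pos]
      have hc : pvCountA ps w (ps[i]).1 i = pvCntF (ps.map Prod.fst) w ((ps.map Prod.fst)[i]'hL') i := by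
        rw [pvCountA_eq_cntF, hgi]
      set cnt := pvCntF (ps.map Prod.fst) w ((ps.map Prod.fst)[i]'hL') i with hcnt
      set j1 := if j < i then i else j with hj1
      have hij1 : i ≤ j1 := by rw [hj1]; split <;> omega
      have hj1le : j1 ≤ i + cnt := by rw [hj1]; split <;> omega
      have hsplit := pvCntF_split (ps.map Prod.fst) w ((ps.map Prod.fst)[i]'hL') (j1 - i) i (by omega)
      have hd : i + (j1 - i) = j1 := by omega
      rw [hd] at hsplit
      have hadv : pvAdvance (ps.map Prod.fst) w ((ps.map Prod.fst)[i]'hL') j1 = i + cnt := by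
        rw [pvAdvance_eq]
        omega
      rw [hadv, hc]
      have hsub : i + cnt - i = cnt := by omega
      rw [hsub, hgi]
      have hnext : ∀ h2 : i + 1 < ps.length,
          i + cnt ≤ (i + 1) + pvCntF (ps.map Prod.fst) w ((ps.map Prod.fst)[i+1]'(by simpa using h2)) (i + 1) := by
        intro h2
        have h2' : i + 1 < (ps.map Prod.fst).length := by simpa using h2
        have hmonoP : (ps.map Prod.fst)[i]'hL' ≤ (ps.map Prod.fst)[i+1]'h2' :=
          pairwise_getElem_le _ hL (by omega) h2'
        have hstep := pvCntF_step (ps.map Prod.fst) w ((ps.map Prod.fst)[i]'hL') i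
        have hmono := pvCntF_mono (ps.map Prod.fst) w ((ps.map Prod.fst)[i]'hL')
          ((ps.map Prod.fst)[i+1]'h2') hmonoP (i + 1)
        omega
      by_cases hgt : cnt > bc
      · rw [if_pos hgt, if_pos hgt]
        exact ih (i + 1) (by omega) (i + cnt) _ _ hnext
      · rw [if_neg hgt, if_neg hgt]
        exact ih (i + 1) (by omega) (i + cnt) _ _ hnext
    · omega

-- glue on the top level
theorem gen_eq (text : String) (query_terms : List String) (max_len : Int) :
    generate_snippet_py text query_terms max_len = generate_snippet_py_alt text query_terms max_len := by
  unfold generate_snippet_py generate_snippet_py_alt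
  dsimp only
  by_cases ht : text = ""
  · rw [if_pos ht, if_pos ht]
  · rw [if_neg ht, if_neg ht]
    have hstarts : query_terms.foldl
        (fun acc term => pvFindAllB (PySem.Str.lower text) term (text.toList.length + 2) 0 acc) []
        = (query_terms.foldl
            (fun acc term => pvFindAllA (PySem.Str.lower text) term (text.toList.length + 2) 0 acc) []).map Prod.fst := by
      have := pvCollect_map (PySem.Str.lower text) (text.toList.length + 2) query_terms []
      simpa using this
    rw [hstarts]
    set mp := query_terms.foldl
      (fun acc term => pvFindAllA (PySem.Str.lower text) term (text.toList.length + 2) 0 acc)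
      ([] : List (Int × Int)) with hmp
    rw [sorted_map_fst mp]
    by_cases hm : mp = []
    · simp [hm, sorted2_eq_foldl]
    · have hs2 : (PySem.List.sorted2 mp Prod.fst Prod.snd).map Prod.fst ≠ [] := by
        intro hcon
        apply hm
        have hperm := PySem.List.sorted2_perm mp Prod.fst Prod.snd false
        have : PySem.List.sorted2 mp Prod.fst Prod.snd = [] := by
          simpa using hcon
        rw [this] at hperm
        exact hperm.symm.eq_nil
      rw [if_neg hm, if_neg hs2]
      have hpw : ((PySem.List.sorted2 mp Prod.fst Prod.snd).map Prod.fst).Pairwise (· ≤ ·) :=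
        List.pairwise_map.mpr (sorted2_pairwise_fst mp)
      rw [pvBest_eq (PySem.List.sorted2 mp Prod.fst Prod.snd) max_len hpw 0 0 0 0 (by intro _; omega)]
      rfl

-- ===== VERDICT (by name: the statement is the Claim_ definition above) =====
theorem generate_snippet_py_spec : Claim_equal_generate_snippet_py := by
  intro text query_terms max_len _
  exact gen_eq text query_terms max_len
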